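-- pv_equiv track=rewrite | github.com/11NOel11/ChaosBench-Logic | scripts/heavy_verify_ontology.py | compute_chain_stats
-- ===== SOURCE A (Python) =====
-- from typing import Any, Dict, List, Optional, Set, Tuple
--
-- def compute_chain_stats(
--     requires: Dict[str, Set[str]],
--     predicates: List[str],
--     max_hops: int = 6,
-- ) -> Dict[int, int]:
--     """Compute number of reachable predicate pairs at each hop distance."""
--     hop_counts: Dict[int, int] = {k: 0 for k in range(2, max_hops + 1)}
--
--     for source in predicates:
--         # BFS from source
--         frontier: Set[str] = {source}
--         visited: Set[str] = {source}
--         depth = 0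
--
--         while frontier and depth < max_hops:
--             depth += 1
--             next_frontier: Set[str] = set()
--             for node in frontier:
--                 for neighbor in requires.get(node, set()):
--                     if neighbor not in visited:
--                         visited.add(neighbor)
--                         next_frontier.add(neighbor)
--                         if depth >= 2:
--                             hop_counts[depth] = hop_counts.get(depth, 0) + 1
--             frontier = next_frontier
--
--     return hop_counts
-- ===== SOURCE B (Python) =====
-- from collections import deque
--
--
-- def compute_chain_stats(requires, predicates, max_hops=6):
--     """Same stats via a single deque-based BFS with a dist map per source."""
--     hop_counts = {k: 0 for k in range(2, max_hops + 1)}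
--
--     for source in predicates:
--         dist = {source: 0}
--         queue = deque([source])
--         while queue:
--             node = queue.popleft()
--             nd = dist[node] + 1
--             if dist[node] < max_hops:
--                 for neighbor in requires.get(node, set()):
--                     if neighbor not in dist:
--                         dist[neighbor] = nd
--                         queue.append(neighbor)
--                         if nd >= 2:
--                             hop_counts[nd] += 1
--     return hop_counts
-- ===== Notes on version B (the rewrite author's own statement) =====
-- stated objective: idiomatic
-- what changed: Replaces the level-synchronized frontier/next_frontier-set BFS by a single deque-based FIFO BFS per source that keeps one dist dictionary (distance map doubling as the visited set) and counts a pair the moment its node is discovered at distance >= 2.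
import Mathlib
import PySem

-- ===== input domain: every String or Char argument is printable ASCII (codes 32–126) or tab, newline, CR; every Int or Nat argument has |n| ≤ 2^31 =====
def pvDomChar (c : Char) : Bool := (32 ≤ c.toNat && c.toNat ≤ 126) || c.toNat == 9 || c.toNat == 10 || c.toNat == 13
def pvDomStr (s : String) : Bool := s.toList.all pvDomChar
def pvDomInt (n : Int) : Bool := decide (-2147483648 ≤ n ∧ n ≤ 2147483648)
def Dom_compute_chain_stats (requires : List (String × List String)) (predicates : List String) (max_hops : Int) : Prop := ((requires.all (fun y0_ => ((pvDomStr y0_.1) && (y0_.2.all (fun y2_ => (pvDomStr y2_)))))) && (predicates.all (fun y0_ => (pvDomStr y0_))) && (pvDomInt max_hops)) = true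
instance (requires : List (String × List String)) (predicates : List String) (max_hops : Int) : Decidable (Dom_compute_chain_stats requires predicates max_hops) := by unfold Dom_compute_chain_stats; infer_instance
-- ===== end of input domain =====

-- B replaces A's level-synchronized frontier/next_frontier BFS by a single FIFO-queue BFS
-- with a distance map per source (objective: idiomatic/alternative; equal return values).

-- ===== PORT A =====
-- inner 'for neighbor in requires.get(node, set())' body at depth dd, over state (visited, next_frontier, hop_counts)
def chainNbrStepA (dd : Int)
    (st : PySem.Set String × PySem.Set String × PySem.Dict Int Int) (nb : String) :
    PySem.Set String × PySem.Set String × PySem.Dict Int Int :=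
  let (V, N, H) := st
  if PySem.Set.contains V nb then (V, N, H)
  else (PySem.Set.add V nb, PySem.Set.add N nb,
        if 2 ≤ dd then PySem.Dict.modify H dd 0 (· + 1) else H)

-- 'for node in frontier' body
def chainNodeStepA (requires : List (String × List String)) (dd : Int)
    (st : PySem.Set String × PySem.Set String × PySem.Dict Int Int) (node : String) :
    PySem.Set String × PySem.Set String × PySem.Dict Int Int :=
  (PySem.Dict.getD (PySem.Dict.mk requires) node []).foldl (chainNbrStepA dd) st

-- 'while frontier and depth < max_hops' loop; fuel max_hops.toNat is exact: the guard
-- depth < max_hops fails exactly when the fuel would run out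
def chainLoopA (requires : List (String × List String)) (maxh : Int) :
    Nat → PySem.Set String → PySem.Set String → Int → PySem.Dict Int Int → PySem.Dict Int Int
  | 0, _, _, _, H => H
  | f + 1, F, V, d, H =>
    if F ≠ [] ∧ d < maxh then
      match F.foldl (chainNodeStepA requires (d + 1)) (V, PySem.Set.empty, H) with
      | (V', N', H') => chainLoopA requires maxh f N' V' (d + 1) H'
    else H

def compute_chain_stats (requires : List (String × List String)) (predicates : List String) (max_hops : Int) : List (Int × Int) :=
  (predicates.foldl
    (fun H source => chainLoopA requires max_hops max_hops.toNat [source] [source] 0 H)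
    ((PySem.List.pyRange 2 (max_hops + 1) 1).foldl (fun h k => PySem.Dict.insert h k 0) PySem.Dict.empty)).items

-- ===== PORT B =====
-- 'for neighbor in requires.get(node, set())' body with nd = dist[node] + 1, over (queue, dist, hop_counts)
def chainNbrStepB (nd : Int)
    (st : List String × PySem.Dict String Int × PySem.Dict Int Int) (nb : String) :
    List String × PySem.Dict String Int × PySem.Dict Int Int :=
  let (q, dist, H) := st
  if PySem.Dict.contains dist nb then (q, dist, H)
  else (q ++ [nb], PySem.Dict.insert dist nb nd,
        if 2 ≤ nd then PySem.Dict.modify H nd 0 (· + 1) else H)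

-- 'while queue' loop; the fuel passed by compute_chain_stats_alt bounds the number of pops
def chainLoopB (requires : List (String × List String)) (maxh : Int) :
    Nat → List String → PySem.Dict String Int → PySem.Dict Int Int → PySem.Dict Int Int
  | 0, _, _, H => H
  | _ + 1, [], _, H => H
  | f + 1, node :: q, dist, H =>
    let nd := PySem.Dict.getD dist node 0 + 1
    if PySem.Dict.getD dist node 0 < maxh then
      match (PySem.Dict.getD (PySem.Dict.mk requires) node []).foldl (chainNbrStepB nd) (q, dist, H) with
      | (q', dist', H') => chainLoopB requires maxh f q' dist' H'
    else chainLoopB requires maxh f q dist H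

def compute_chain_stats_alt (requires : List (String × List String)) (predicates : List String) (max_hops : Int) : List (Int × Int) :=
  (predicates.foldl
    (fun H source =>
      chainLoopB requires max_hops
        (1 + (PySem.Set.ofList (requires.flatMap (fun p => p.2))).length)
        [source] (PySem.Dict.insert PySem.Dict.empty source 0) H)
    ((PySem.List.pyRange 2 (max_hops + 1) 1).foldl (fun h k => PySem.Dict.insert h k 0) PySem.Dict.empty)).items

-- ===== PRECONDITION & SPEC =====
def Spec_compute_chain_stats (requires : List (String × List String)) (predicates : List String) (max_hops : Int) (out : List (Int × Int)) : Prop := out = compute_chain_stats_alt requires predicates max_hops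
instance (requires : List (String × List String)) (predicates : List String) (max_hops : Int) (out : List (Int × Int)) : Decidable (Spec_compute_chain_stats requires predicates max_hops out) := by unfold Spec_compute_chain_stats; infer_instance

-- ===== CLAIM (what is proved, stated in full; the proofs are below) =====
def Claim_equal_compute_chain_stats : Prop := ∀ (requires : List (String × List String)) (predicates : List String) (max_hops : Int), Dom_compute_chain_stats requires predicates max_hops → Spec_compute_chain_stats requires predicates max_hops (compute_chain_stats requires predicates max_hops)

-- ===== LEMMAS AND PROOFS =====

-- the neighbor list a node contributes
def chainNbrs (requires : List (String × List String)) (u : String) : List String :=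
  PySem.Dict.getD (PySem.Dict.mk requires) u []

-- remaining discovery capacity: distinct possible neighbors not yet in the dist map
def chainCap (requires : List (String × List String)) (K : List String) : Nat :=
  ((PySem.Set.ofList (requires.flatMap (fun p => p.2))).filter (fun x => !(K.contains x))).length

lemma get?_mk_mem {ν : Type} (l : List (String × ν)) (k : String) (v : ν)
    (h : (PySem.Dict.mk l).get? k = some v) : (k, v) ∈ l := by
  induction l with
  | nil => simp [PySem.Dict.get?] at h
  | cons p t ih =>
    obtain ⟨a, b⟩ := p
    rw [PySem.Dict.get?_mk_cons] at h
    split at h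
    · rename_i hak
      simp only [beq_iff_eq] at hak
      cases h
      simp [hak]
    · exact List.mem_cons_of_mem _ (ih h)

lemma chainNbrs_mem_flatMap (requires : List (String × List String)) (u x : String)
    (hx : x ∈ chainNbrs requires u) : x ∈ requires.flatMap (fun p => p.2) := by
  unfold chainNbrs at hx
  rw [PySem.Dict.getD_eq_get?_getD] at hx
  cases h : (PySem.Dict.mk requires).get? u with
  | none => rw [h] at hx; simp at hx
  | some v =>
    rw [h] at hx
    simp only [Option.getD_some] at hx
    exact List.mem_flatMap.2 ⟨(u, v), get?_mk_mem _ _ _ h, hx⟩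

lemma chainCap_drop (requires : List (String × List String)) (K Δ : List String)
    (hΔ : Δ.Nodup) (hΔS : ∀ x ∈ Δ, x ∈ requires.flatMap (fun p => p.2))
    (hΔK : ∀ x ∈ Δ, x ∉ K) :
    chainCap requires (K ++ Δ) + Δ.length ≤ chainCap requires K := by
  unfold chainCap
  set S : List String := PySem.Set.ofList (requires.flatMap (fun p => p.2)) with hSdef
  have hS : S.Nodup := PySem.Set.nodup_ofList _
  have hsplit : (S.filter (fun x => !(K.contains x))).length
      = (S.filter (fun x => !((K ++ Δ).contains x))).length
        + (S.filter (fun x => Δ.contains x)).length := by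
    have h1 : S.filter (fun x => !((K ++ Δ).contains x))
        = (S.filter (fun x => !(K.contains x))).filter (fun x => !(Δ.contains x)) := by
      rw [List.filter_filter]
      apply List.filter_congr
      intro x _
      by_cases h1 : x ∈ K <;> by_cases h2 : x ∈ Δ <;>
        simp [List.contains_eq_mem, h1, h2]
    have h2 : S.filter (fun x => Δ.contains x)
        = (S.filter (fun x => !(K.contains x))).filter (fun x => Δ.contains x) := by
      rw [List.filter_filter]
      apply List.filter_congr
      intro x _
      by_cases h2 : x ∈ Δ
      · simp [List.contains_eq_mem, h2, hΔK x h2]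
      · simp [List.contains_eq_mem, h2]
    rw [h1, h2]
    have hid := List.length_eq_length_filter_add
      (l := S.filter (fun x => !(K.contains x))) (f := fun x => Δ.contains x)
    omega
  have hlen : (S.filter (fun x => Δ.contains x)).length = Δ.length := by
    have hperm : (S.filter (fun x => Δ.contains x)).Perm Δ := by
      rw [List.perm_ext_iff_of_nodup (hS.filter _) hΔ]
      intro a
      simp only [List.mem_filter, List.contains_iff_mem]
      constructor
      · rintro ⟨-, h⟩; exact h
      · intro h
        exact ⟨by rw [hSdef]; exact (PySem.Set.mem_ofList _ _).2 (hΔS a h), h⟩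
    exact hperm.length_eq
  omega

-- one neighbor-list fold: A's (visited, next, hops) fold and B's (queue, dist, hops) fold stay in lockstep
lemma chainPair (dd : Int) :
    ∀ (L V N q : List String) (dist : PySem.Dict String Int) (H : PySem.Dict Int Int),
    V = dist.keys → (∀ x ∈ N, x ∈ V) →
    ∃ (Δ : List String) (dist' : PySem.Dict String Int) (H' : PySem.Dict Int Int),
      L.foldl (chainNbrStepB dd) (q, dist, H) = (q ++ Δ, dist', H') ∧
      L.foldl (chainNbrStepA dd) (V, N, H) = (V ++ Δ, N ++ Δ, H') ∧
      dist'.keys = dist.keys ++ Δ ∧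
      Δ.Nodup ∧ (∀ x ∈ Δ, x ∈ L) ∧ (∀ x ∈ Δ, x ∉ dist.keys) ∧
      (∀ x v, dist.get? x = some v → dist'.get? x = some v) ∧
      (∀ x ∈ Δ, dist'.get? x = some dd) := by
  intro L
  induction L with
  | nil =>
    intro V N q dist H hV hNV
    exact ⟨[], dist, H, by simp, by simp, by simp, by simp, by simp, by simp,
      fun x v h => h, by simp⟩
  | cons nb L' ih =>
    intro V N q dist H hV hNV
    by_cases hmem : nb ∈ dist.keys
    · -- already discovered: both sides skip nb
      have hcA : PySem.Set.contains V nb = true := by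
        rw [PySem.Set.contains_iff, hV]; exact hmem
      have hcB : PySem.Dict.contains dist nb = true :=
        (PySem.Dict.contains_iff_mem_keys _ _).2 hmem
      have hnbV : nb ∈ V := hV ▸ hmem
      have hstepA : chainNbrStepA dd (V, N, H) nb = (V, N, H) := by
        simp [chainNbrStepA, hnbV]
      have hstepB : chainNbrStepB dd (q, dist, H) nb = (q, dist, H) := by
        simp [chainNbrStepB, hcB]
      obtain ⟨Δ, dist', H', hB, hA, hk, hnd, hL, hK, hpres, hval⟩ :=
        ih V N q dist H hV hNV
      exact ⟨Δ, dist', H', by simpa [hstepB] using hB, by simpa [hstepA] using hA,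
        hk, hnd, fun x hx => List.mem_cons_of_mem _ (hL x hx), hK, hpres, hval⟩
    · -- new node: both sides append nb
      have hnbV : nb ∉ V := by rw [hV]; exact hmem
      have hcA : PySem.Set.contains V nb = false := by
        cases h : PySem.Set.contains V nb
        · rfl
        · exact absurd ((PySem.Set.contains_iff _ _).1 h) hnbV
      have hcB : PySem.Dict.contains dist nb = false := by
        cases h : PySem.Dict.contains dist nb
        · rfl
        · exact absurd ((PySem.Dict.contains_iff_mem_keys _ _).1 h) hmem
      have hnbN : nb ∉ N := fun h => hnbV (hNV nb h)
      have hkeys : (dist.insert nb dd).keys = dist.keys ++ [nb] :=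
        PySem.Dict.keys_insert_of_not_contains dist dd hcB
      have hstepA : chainNbrStepA dd (V, N, H) nb
          = (V ++ [nb], N ++ [nb], if 2 ≤ dd then PySem.Dict.modify H dd 0 (· + 1) else H) := by
        simp [chainNbrStepA, hnbV, PySem.Set.add_of_not_mem hnbN]
      have hstepB : chainNbrStepB dd (q, dist, H) nb
          = (q ++ [nb], dist.insert nb dd, if 2 ≤ dd then PySem.Dict.modify H dd 0 (· + 1) else H) := by
        simp [chainNbrStepB, hcB]
      obtain ⟨Δ', dist', H', hB, hA, hk, hnd, hL, hK, hpres, hval⟩ :=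
        ih (V ++ [nb]) (N ++ [nb]) (q ++ [nb]) (dist.insert nb dd)
          (if 2 ≤ dd then PySem.Dict.modify H dd 0 (· + 1) else H)
          (by rw [hkeys, hV])
          (by intro x hx
              rcases List.mem_append.1 hx with h | h
              · exact List.mem_append.2 (Or.inl (hNV x h))
              · exact List.mem_append.2 (Or.inr h))
      have hnbΔ' : nb ∉ Δ' := by
        intro h
        exact hK nb h (by rw [hkeys]; exact List.mem_append.2 (Or.inr (by simp)))
      refine ⟨nb :: Δ', dist', H', ?_, ?_, ?_, ?_, ?_, ?_, ?_, ?_⟩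
      · rw [List.foldl_cons, hstepB, hB]; simp
      · rw [List.foldl_cons, hstepA, hA]; simp
      · rw [hk, hkeys]; simp
      · exact List.nodup_cons.2 ⟨hnbΔ', hnd⟩
      · intro x hx
        rcases List.mem_cons.1 hx with rfl | hx
        · exact List.mem_cons_self ..
        · exact List.mem_cons_of_mem _ (hL x hx)
      · intro x hx
        rcases List.mem_cons.1 hx with rfl | hx
        · exact hmem
        · intro hxk
          exact hK x hx (by rw [hkeys]; exact List.mem_append.2 (Or.inl hxk))
      · intro x v hx
        have hxnb : x ≠ nb := by
          intro h
          subst h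
          exact hmem ((PySem.Dict.contains_iff_mem_keys _ _).1
            (by rw [PySem.Dict.contains_eq_isSome_get?, hx]; rfl))
        exact hpres x v (by rw [PySem.Dict.get?_insert_of_ne dist dd hxnb]; exact hx)
      · intro x hx
        rcases List.mem_cons.1 hx with rfl | hx
        · exact hpres x dd (PySem.Dict.get?_insert_self dist x dd)
        · exact hval x hx

-- nodes whose distance has reached max_hops are popped without expansion
lemma chainDrain (requires : List (String × List String)) (maxh : Int) :
    ∀ (F : List String) (f : Nat) (dist : PySem.Dict String Int) (H : PySem.Dict Int Int),
    (∀ u ∈ F, ∃ v, dist.get? u = some v ∧ ¬ v < maxh) → F.length ≤ f →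
    chainLoopB requires maxh f F dist H = H := by
  intro F
  induction F with
  | nil => intro f dist H _ _; cases f <;> simp [chainLoopB]
  | cons u F' ih =>
    intro f dist H hF hf
    simp only [List.length_cons] at hf
    obtain ⟨f', rfl⟩ : ∃ f', f = f' + 1 := ⟨f - 1, by omega⟩
    obtain ⟨v, hv, hvm⟩ := hF u (List.mem_cons_self ..)
    simp only [chainLoopB, PySem.Dict.getD_of_get?_eq_some _ _ hv, if_neg hvm]
    exact ih f' dist H (fun x hx => hF x (List.mem_cons_of_mem _ hx)) (by omega)

-- one whole BFS level: B pops F (all at distance d < maxh) one node at a time and ends up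
-- exactly where A's frontier fold puts it
lemma chainLevel (requires : List (String × List String)) (maxh : Int) (fa' : Nat) (d : Int)
    (hd : d < maxh)
    (IH : ∀ (f : Nat) (F V : List String) (dist : PySem.Dict String Int) (H : PySem.Dict Int Int),
      V = dist.keys → (∀ u ∈ F, dist.get? u = some (d + 1)) →
      F.length + chainCap requires dist.keys ≤ f →
      chainLoopB requires maxh f F dist H = chainLoopA requires maxh fa' F V (d + 1) H) :
    ∀ (F N V : List String) (dist : PySem.Dict String Int) (H : PySem.Dict Int Int) (f : Nat),
    V = dist.keys → (∀ u ∈ F, dist.get? u = some d) → (∀ x ∈ N, dist.get? x = some (d + 1)) →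
    (∀ x ∈ N, x ∈ V) → (F ++ N).length + chainCap requires dist.keys ≤ f →
    chainLoopB requires maxh f (F ++ N) dist H =
      (match F.foldl (chainNodeStepA requires (d + 1)) (V, N, H) with
       | (V', N', H') => chainLoopA requires maxh fa' N' V' (d + 1) H') := by
  intro F
  induction F with
  | nil =>
    intro N V dist H f hV hF hN hNV hf
    simp only [List.nil_append, List.foldl_nil]
    exact IH f N V dist H hV hN (by simpa using hf)
  | cons u F' ihF =>
    intro N V dist H f hV hF hN hNV hf
    simp only [List.length_append, List.length_cons] at hf
    obtain ⟨f₁, rfl⟩ : ∃ f₁, f = f₁ + 1 := ⟨f - 1, by omega⟩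
    have hu : dist.get? u = some d := hF u (List.mem_cons_self ..)
    obtain ⟨Δ, dist', H', hB, hA, hk, hnd, hL, hK, hpres, hval⟩ :=
      chainPair (d + 1) (chainNbrs requires u) V N (F' ++ N) dist H hV hNV
    have hstep : chainLoopB requires maxh (f₁ + 1) ((u :: F') ++ N) dist H
        = chainLoopB requires maxh f₁ (F' ++ (N ++ Δ)) dist' H' := by
      simp only [List.cons_append, chainLoopB, PySem.Dict.getD_of_get?_eq_some _ _ hu,
        if_pos hd]
      rw [show PySem.Dict.getD (PySem.Dict.mk requires) u [] = chainNbrs requires u from rfl,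
        hB]
      simp [List.append_assoc]
    rw [hstep]
    have hnode : chainNodeStepA requires (d + 1) (V, N, H) u = (V ++ Δ, N ++ Δ, H') := by
      rw [chainNodeStepA,
        show PySem.Dict.getD (PySem.Dict.mk requires) u [] = chainNbrs requires u from rfl, hA]
    have hcap : chainCap requires dist'.keys + Δ.length ≤ chainCap requires dist.keys := by
      rw [hk]
      exact chainCap_drop requires dist.keys Δ hnd
        (fun x hx => chainNbrs_mem_flatMap requires u x (hL x hx)) hK
    rw [List.foldl_cons, hnode]
    exact ihF (N ++ Δ) (V ++ Δ) dist' H' f₁ (by rw [hk, hV])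
      (fun x hx => hpres x d (hF x (List.mem_cons_of_mem _ hx)))
      (by intro x hx
          rcases List.mem_append.1 hx with h | h
          · exact hpres x (d + 1) (hN x h)
          · exact hval x h)
      (by intro x hx
          rcases List.mem_append.1 hx with h | h
          · exact List.mem_append.2 (Or.inl (hNV x h))
          · exact List.mem_append.2 (Or.inr h))
      (by simp only [List.length_append]; omega)

-- the core bisimulation: queue BFS = level BFS, given enough queue fuel
lemma chainMain (requires : List (String × List String)) (maxh : Int) :
    ∀ (fa f : Nat) (F V : List String) (dist : PySem.Dict String Int) (H : PySem.Dict Int Int)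
      (d : Int),
    V = dist.keys → (∀ u ∈ F, dist.get? u = some d) → fa = (maxh - d).toNat →
    F.length + chainCap requires dist.keys ≤ f →
    chainLoopB requires maxh f F dist H = chainLoopA requires maxh fa F V d H := by
  intro fa
  induction fa with
  | zero =>
    intro f F V dist H d hV hF hfa hf
    have hdm : ¬ d < maxh := by omega
    rw [show chainLoopA requires maxh 0 F V d H = H from rfl]
    exact chainDrain requires maxh F f dist H
      (fun u hu => ⟨d, hF u hu, hdm⟩) (by omega)
  | succ fa' ih =>
    intro f F V dist H d hV hF hfa hf
    have hd : d < maxh := by omega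
    cases F with
    | nil =>
      have hB : chainLoopB requires maxh f [] dist H = H := by
        cases f <;> simp [chainLoopB]
      rw [hB]
      simp [chainLoopA]
    | cons u F' =>
      have hA : chainLoopA requires maxh (fa' + 1) (u :: F') V d H =
          (match (u :: F').foldl (chainNodeStepA requires (d + 1)) (V, PySem.Set.empty, H) with
           | (V', N', H') => chainLoopA requires maxh fa' N' V' (d + 1) H') := by
        simp [chainLoopA, hd]
      rw [hA]
      have := chainLevel requires maxh fa' d hd
        (fun f F V dist H h1 h2 h3 => ih f F V dist H (d + 1) h1 h2 (by omega) h3)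
        (u :: F') [] V dist H f hV hF (by simp) (by simp) (by simpa using hf)
      simpa using this

-- per-source: A's level BFS from source equals B's queue BFS from source
lemma chainPerSource (requires : List (String × List String)) (maxh : Int)
    (H : PySem.Dict Int Int) (src : String) :
    chainLoopA requires maxh maxh.toNat [src] [src] 0 H =
      chainLoopB requires maxh
        (1 + (PySem.Set.ofList (requires.flatMap (fun p => p.2))).length)
        [src] (PySem.Dict.insert PySem.Dict.empty src 0) H := by
  have hkeys : (PySem.Dict.insert (PySem.Dict.empty (κ := String) (ν := Int)) src 0).keys = [src] := by
    rw [PySem.Dict.keys_insert_of_not_contains _ _ (by simp [pysem])]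
    simp [pysem]
  refine (chainMain requires maxh maxh.toNat _ [src] [src] _ H 0 hkeys.symm ?_ ?_ ?_).symm
  · intro u hu
    rcases List.mem_cons.1 hu with rfl | hu
    · exact PySem.Dict.get?_insert_self _ _ _
    · simp at hu
  · omega
  · have := List.length_filter_le (fun x => !(((PySem.Dict.insert (PySem.Dict.empty (κ := String) (ν := Int)) src 0).keys).contains x))
      (PySem.Set.ofList (requires.flatMap (fun p => p.2)))
    simp only [chainCap, List.length_cons, List.length_nil]
    omega

-- ===== VERDICT (by name: the statement is the Claim_ definition above) =====
lemma chainFold (requires : List (String × List String)) (maxh : Int) :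
    ∀ (t : List String) (H : PySem.Dict Int Int),
    t.foldl (fun H source => chainLoopA requires maxh maxh.toNat [source] [source] 0 H) H =
      t.foldl (fun H source =>
        chainLoopB requires maxh
          (1 + (PySem.Set.ofList (requires.flatMap (fun p => p.2))).length)
          [source] (PySem.Dict.insert PySem.Dict.empty source 0) H) H := by
  intro t
  induction t with
  | nil => intro H; rfl
  | cons p t ih =>
    intro H
    rw [List.foldl_cons, List.foldl_cons, chainPerSource]
    exact ih _

theorem compute_chain_stats_spec : Claim_equal_compute_chain_stats := by
  unfold Claim_equal_compute_chain_stats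
  intro requires predicates max_hops _
  unfold Spec_compute_chain_stats compute_chain_stats compute_chain_stats_alt
  rw [chainFold]
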